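-- pv_equiv track=rewrite | github.com/kirienko/adventofcode | year_2024/day_11.py | parse
-- ===== SOURCE A (Python) =====
-- from collections import Counter
--
-- def parse(text: str):
--     zeros = 0
--     evens = Counter()
--     other = Counter()
--
--     for elem in text.strip().split():
--         if elem == '0':
--             zeros += 1
--         elif len(elem) % 2 == 0:
--             evens.update([elem])
--         else:
--             other.update([int(elem)])
--     return zeros, evens, other
-- ===== SOURCE B (Python) =====
-- from collections import Counter
--
-- def parse(text: str):
--     # Three independent passes (count + two filtered Counter builds) instead of one branching loop.
--     toks = text.strip().split()
--     zeros = toks.count('0')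
--     evens = Counter(t for t in toks if t != '0' and len(t) % 2 == 0)
--     other = Counter(int(t) for t in toks if t != '0' and len(t) % 2 == 1)
--     return zeros, evens, other
-- ===== Notes on version B (the rewrite author's own statement) =====
-- stated objective: simpler
-- what changed: Replaced the single branching accumulation loop by three independent declarative passes: a list.count for the zeros and two Counter() constructions over filtered token streams.
import Mathlib
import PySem

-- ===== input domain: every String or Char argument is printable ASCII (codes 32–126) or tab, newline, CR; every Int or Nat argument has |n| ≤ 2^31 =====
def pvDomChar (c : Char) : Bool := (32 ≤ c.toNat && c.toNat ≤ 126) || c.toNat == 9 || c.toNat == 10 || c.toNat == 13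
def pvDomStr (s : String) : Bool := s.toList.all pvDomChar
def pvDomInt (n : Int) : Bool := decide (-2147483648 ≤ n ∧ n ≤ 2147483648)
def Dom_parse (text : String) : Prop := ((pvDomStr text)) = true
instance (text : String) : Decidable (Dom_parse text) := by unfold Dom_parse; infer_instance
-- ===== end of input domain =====

-- B replaces A's single branching loop by a token count plus two filtered Counter builds (three independent passes); same cost, plainer code.

-- ===== PORT A =====
-- one loop step: the three-way branch of A's for-body over the running (zeros, evens, other) state
def parseStep (st : Int × PySem.Dict String Int × PySem.Dict Int Int) (elem : String) :
    Int × PySem.Dict String Int × PySem.Dict Int Int :=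
  if elem == "0" then (st.1 + 1, st.2.1, st.2.2)
  else if PySem.Str.len elem % 2 == 0 then (st.1, st.2.1.modify elem 0 (· + 1), st.2.2)
  else (st.1, st.2.1, st.2.2.modify ((PySem.Int.ofStr? elem).getD 0) 0 (· + 1))
  -- int(elem) is PySem.Int.ofStr?; Pre_parse below excludes the inputs where it is none (Python raises ValueError)

def parse (text : String) : Int × (List (String × Int)) × (List (Int × Int)) :=
  let r := (PySem.Str.split₀ (PySem.Str.strip text)).foldl parseStep (0, PySem.Dict.empty, PySem.Dict.empty)
  (r.1, r.2.1.items, r.2.2.items)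

-- ===== PORT B =====
def parse_alt (text : String) : Int × (List (String × Int)) × (List (Int × Int)) :=
  let toks := PySem.Str.split₀ (PySem.Str.strip text)
  let zeros : Int := (toks.count "0" : Int)
  let evens := PySem.Dict.counter (toks.filter (fun t => t != "0" && PySem.Str.len t % 2 == 0))
  let other := PySem.Dict.counter
      ((toks.filter (fun t => t != "0" && PySem.Str.len t % 2 != 0)).map
        (fun t => (PySem.Int.ofStr? t).getD 0))
  (zeros, evens.items, other.items)

-- ===== PRECONDITION & SPEC =====
-- Pre_ excludes exactly the inputs where Python's int() raises ValueError: a token that is not '0',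
-- has odd length and is not a valid int literal reaches int(elem) in A (and int(t) in B) and both raise.
def Pre_parse (text : String) : Prop :=
  ∀ t ∈ PySem.Str.split₀ (PySem.Str.strip text),
    t ≠ "0" → PySem.Str.len t % 2 ≠ 0 → (PySem.Int.ofStr? t).isSome = true
instance (text : String) : Decidable (Pre_parse text) := by unfold Pre_parse; infer_instance
def pvWitness_parse : String := "0 17 abcd 125 +7"

def Spec_parse (text : String) (out : Int × (List (String × Int)) × (List (Int × Int))) : Prop := out = parse_alt text
instance (text : String) (out : Int × (List (String × Int)) × (List (Int × Int))) : Decidable (Spec_parse text out) := by unfold Spec_parse; infer_instance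

-- ===== CLAIM (what is proved, stated in full; the proofs are below) =====
def Claim_equal_parse : Prop := ∀ (text : String), Dom_parse text → Pre_parse text → Spec_parse text (parse text)

-- ===== LEMMAS AND PROOFS =====

-- loop invariant: A's fold over the token list decomposes into B's three independent passes
theorem parse_fold_decomp (l : List String) (z : Int)
    (e : PySem.Dict String Int) (o : PySem.Dict Int Int) :
    l.foldl parseStep (z, e, o) =
      (z + (l.count "0" : Int),
       (l.filter (fun t => t != "0" && PySem.Str.len t % 2 == 0)).foldl
         (fun d x => d.modify x 0 (· + 1)) e,
       ((l.filter (fun t => t != "0" && PySem.Str.len t % 2 != 0)).map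
         (fun t => (PySem.Int.ofStr? t).getD 0)).foldl
         (fun d x => d.modify x 0 (· + 1)) o) := by
  induction l generalizing z e o with
  | nil => simp
  | cons a l ih =>
    by_cases h0 : a = "0"
    · subst h0
      simp [List.foldl_cons, parseStep, ih]
      ring
    · by_cases he : (a.length : Int) % 2 = 0
      · have hd : (2 : Int) ∣ (a.length : Int) := Int.dvd_of_emod_eq_zero he
        have hne : ¬ ((a.length : Int) % 2 = 1) := by omega
        simp [List.foldl_cons, parseStep, PySem.Str.len, h0, he, ih, bne_iff_ne]
      · have hd : ¬ (2 : Int) ∣ (a.length : Int) := by omega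
        have h1 : (a.length : Int) % 2 = 1 := by omega
        simp [List.foldl_cons, parseStep, PySem.Str.len, h0, h1, ih, bne_iff_ne]

-- ===== VERDICT (by name: the statement is the Claim_ definition above) =====
theorem parse_spec : Claim_equal_parse := by
  intro text _ _
  show parse text = parse_alt text
  unfold parse parse_alt
  dsimp only
  rw [parse_fold_decomp, PySem.Dict.counter_eq_foldl, PySem.Dict.counter_eq_foldl, zero_add]
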